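-- pv_equiv track=rewrite | github.com/YousifAlkhalaf/Python_CS | Unit 6/6.6/#6 - FindSmallest2ndNum.py | find_min_2nd
-- ===== SOURCE A (Python) =====
-- def find_min_2nd(num_pairs):
--     '''Returns tuple in num_pairs with smallest second value'''
--     min_num = None
--     min_index = -1
--     for pair in range(len(num_pairs)):
--         num = num_pairs[pair][1]
--         if min_num == None or num < min_num:
--             min_index = pair
--             min_num = num
--     return num_pairs[min_index]
-- ===== SOURCE B (Python) =====
-- def find_min_2nd(num_pairs):
--     '''Returns tuple in num_pairs with smallest second value'''
--     return sorted(num_pairs, key=lambda p: p[1])[0]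
-- ===== Notes on version B (the rewrite author's own statement) =====
-- stated objective: idiomatic
-- what changed: Replaced the index-tracking manual scan with a stable sort by second component followed by taking the first element (ties keep original order, matching A's strict-< first-minimum).
import Mathlib
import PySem

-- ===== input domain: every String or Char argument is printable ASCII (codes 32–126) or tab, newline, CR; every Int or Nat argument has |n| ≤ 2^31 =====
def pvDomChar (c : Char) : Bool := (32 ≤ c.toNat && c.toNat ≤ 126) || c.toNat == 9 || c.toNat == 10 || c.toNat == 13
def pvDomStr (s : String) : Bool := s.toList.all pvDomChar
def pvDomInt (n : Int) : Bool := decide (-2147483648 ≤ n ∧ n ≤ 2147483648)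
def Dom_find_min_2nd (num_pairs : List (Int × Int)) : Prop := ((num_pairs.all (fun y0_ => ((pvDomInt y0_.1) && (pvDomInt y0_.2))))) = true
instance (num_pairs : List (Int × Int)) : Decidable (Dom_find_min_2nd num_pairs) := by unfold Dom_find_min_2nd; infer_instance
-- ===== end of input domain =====

-- B replaces A's index-tracking minimum scan by a stable sort on the second component followed by
-- taking the first element (idiomatic; same first-minimum tie-breaking).


-- ===== PORT A =====
-- literal port: loop over range(len(num_pairs)) carrying (min_num : Option Int, min_index : Int),
-- then index num_pairs[min_index] (pyGetD default unreachable inside Pre_).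
def find_min_2nd (num_pairs : List (Int × Int)) : Int × Int :=
  let st :=
    (PySem.List.pyRange 0 (PySem.List.len num_pairs) 1).foldl
      (fun (st : Option Int × Int) pair =>
        let num := (PySem.List.pyGetD num_pairs pair (0, 0)).2
        match st.1 with
        | none => (some num, pair)
        | some m => if num < m then (some num, pair) else st)
      (none, -1)
  PySem.List.pyGetD num_pairs st.2 (0, 0)

-- ===== PORT B =====
-- literal port of Source B: sorted(num_pairs, key=lambda p: p[1])[0]  ([0] raises on empty → outside Pre_)
def find_min_2nd_alt (num_pairs : List (Int × Int)) : Int × Int :=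
  PySem.List.pyGetD (PySem.List.sorted num_pairs (fun p => p.2) false) 0 (0, 0)

-- ===== PRECONDITION & SPEC =====
-- Pre_ excludes only the empty list, on which A raises IndexError (num_pairs[-1]); B also raises IndexError there.
def Pre_find_min_2nd (num_pairs : List (Int × Int)) : Prop := num_pairs ≠ []
instance (num_pairs : List (Int × Int)) : Decidable (Pre_find_min_2nd num_pairs) := by unfold Pre_find_min_2nd; infer_instance
def pvWitness_find_min_2nd : (List (Int × Int)) := [(1, 2), (3, 1)]

def Spec_find_min_2nd (num_pairs : List (Int × Int)) (out : Int × Int) : Prop := out = find_min_2nd_alt num_pairs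
instance (num_pairs : List (Int × Int)) (out : Int × Int) : Decidable (Spec_find_min_2nd num_pairs out) := by unfold Spec_find_min_2nd; infer_instance

-- ===== CLAIM (what is proved, stated in full; the proofs are below) =====
def Claim_equal_find_min_2nd : Prop := ∀ (num_pairs : List (Int × Int)), Dom_find_min_2nd num_pairs → Pre_find_min_2nd num_pairs → Spec_find_min_2nd num_pairs (find_min_2nd num_pairs)

-- ===== LEMMAS AND PROOFS =====

-- the common value: first element of xs (after seed b) attaining the strict minimum of the second component
def pvBest (b : Int × Int) (xs : List (Int × Int)) : Int × Int :=
  xs.foldl (fun b x => if x.2 < b.2 then x else b) b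

-- B side: the head of the stable insertion sort is the first minimum
theorem foldl_insertBy_head (xs : List (Int × Int)) (h : Int × Int) (t : List (Int × Int)) :
    ∃ t', xs.foldl
        (fun acc x => PySem.List.insertBy (fun a b => decide (a.2 < b.2)) x acc) (h :: t)
      = pvBest h xs :: t' := by
  induction xs generalizing h t with
  | nil => exact ⟨t, rfl⟩
  | cons x xs ih =>
    simp only [List.foldl, pvBest, PySem.List.insertBy]
    by_cases hx : x.2 < h.2
    · simpa [hx] using ih x (h :: t)
    · simpa [hx] using ih h (PySem.List.insertBy (fun a b => decide (a.2 < b.2)) x t)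

theorem alt_eq_pvBest (p : Int × Int) (ps : List (Int × Int)) :
    find_min_2nd_alt (p :: ps) = pvBest p ps := by
  have hs := PySem.List.sorted_eq_foldl_insertBy (xs := p :: ps) (key := fun x => x.2)
  obtain ⟨t', ht'⟩ := foldl_insertBy_head ps p []
  simp only [find_min_2nd_alt, hs, List.foldl, PySem.List.insertBy, ht']
  simp [PySem.List.pyGetD, PySem.List.pyGet?, PySem.List.pyIdx?]

-- A side: the loop invariant — state carries (some best.2, index of best)
theorem foldA (xs : List (Int × Int)) (n : Nat) (i : Nat) (hn : n = xs.length - i)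
    (b : Int × Int) (j : Int) (hj : 0 ≤ j) (hlt : j.toNat < xs.length) (hb : xs[j.toNat] = b) :
    ∃ k : Int,
      (PySem.List.pyRange (i : Int) (xs.length : Int) 1).foldl
          (fun (st : Option Int × Int) pair =>
            match st.1 with
            | none => (some (PySem.List.pyGetD xs pair (0, 0)).2, pair)
            | some m => if (PySem.List.pyGetD xs pair (0, 0)).2 < m then (some (PySem.List.pyGetD xs pair (0, 0)).2, pair) else st)
          (some b.2, j)
        = (some (pvBest b (xs.drop i)).2, k)
      ∧ 0 ≤ k ∧ ∃ hk : k.toNat < xs.length, xs[k.toNat] = pvBest b (xs.drop i) := by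
  induction n generalizing i b j with
  | zero =>
    have hge : xs.length ≤ i := by omega
    rw [PySem.List.pyRange_one_eq_nil (by exact_mod_cast hge), List.drop_of_length_le hge]
    exact ⟨j, rfl, hj, hlt, hb⟩
  | succ n ih =>
    have hi : i < xs.length := by omega
    rw [PySem.List.pyRange_one_cons (by exact_mod_cast hi)]
    have hget : PySem.List.pyGetD xs (i : Int) (0, 0) = xs[i] := by
      simp [PySem.List.pyGetD, PySem.List.pyGet?, PySem.List.pyIdx?, hi]
    have hdrop : xs.drop i = xs[i] :: xs.drop (i + 1) :=
      List.drop_eq_getElem_cons hi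
    simp only [List.foldl, hget, hdrop, pvBest]
    by_cases hx : xs[i].2 < b.2
    · simp only [hx, if_pos]
      have := ih (i + 1) (by omega) xs[i] (i : Int) (by positivity)
        (by simpa using hi) (by simp)
      simpa [pvBest, hx, Int.add_comm] using this
    · simp only [hx, if_false]
      have := ih (i + 1) (by omega) b j hj hlt hb
      simpa [pvBest, hx, Int.add_comm] using this

theorem a_eq_pvBest (p : Int × Int) (ps : List (Int × Int)) :
    find_min_2nd (p :: ps) = pvBest p ps := by
  have hlen : (0 : Int) < ((p :: ps).length : Int) := by
    simp
  simp only [find_min_2nd, PySem.List.len_eq]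
  rw [PySem.List.pyRange_one_cons hlen]
  have hget0 : PySem.List.pyGetD (p :: ps) (0 : Int) (0, 0) = p := by
    simp [PySem.List.pyGetD, PySem.List.pyGet?, PySem.List.pyIdx?]
  simp only [List.foldl, hget0]
  obtain ⟨k, hfold, hk0, hklt, hkval⟩ :=
    foldA (p :: ps) ((p :: ps).length - 1) 1 rfl p 0 le_rfl (by simp) (by simp)
  simp only [zero_add]
  simp only [Nat.cast_one] at hfold
  rw [hfold]
  have : PySem.List.pyGetD (p :: ps) k (0, 0) = (p :: ps)[k.toNat] := by
    rcases k with k | k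
    · have hk' : k ≤ ps.length := by simp at hklt; omega
      simp [PySem.List.pyGetD, PySem.List.pyGet?, PySem.List.pyIdx?, hk']
      rfl
    · exact absurd hk0 (by simp)
  rw [this, hkval]
  simp

-- ===== VERDICT (by name: the statement is the Claim_ definition above) =====
theorem find_min_2nd_spec : Claim_equal_find_min_2nd := by
  intro num_pairs _ hpre
  cases num_pairs with
  | nil => exact absurd rfl hpre
  | cons p ps =>
    unfold Spec_find_min_2nd
    rw [a_eq_pvBest, alt_eq_pvBest]
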